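-- pv_equiv track=rewrite | github.com/MIdeGier/digital-sustainability-dashboard | dashboard.py | map_response_to_maturity
-- ===== SOURCE A (Python) =====
-- def map_response_to_maturity(response_text: str) -> int:
--     """Map survey response text to maturity level 1-5"""
--     if not response_text or response_text.strip() == '':
--         return 0
--
--     response_lower = response_text.lower()
--
--     # Keywords indicating different maturity levels
--     level_indicators = {
--         5: ['autonomous', 'ai-driven', 'self-learning', 'adaptive', 'fully autonomous', 'continuous learning'],
--         4: ['prescriptive', 'recommend', 'advanced analytics', 'automatically implement', 'real-time optimization'],
--         3: ['predictive', 'forecast', 'system-generated alerts', 'proactive', 'anticipate'],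
--         2: ['dashboard', 'diagnostic', 'real-time data', 'analyze', 'identify', 'monitor'],
--         1: ['basic', 'manual', 'limited', 'minimal', 'awareness', 'historical']
--     }
--
--     # Check for highest maturity level first
--     for level in range(5, 0, -1):
--         if any(keyword in response_lower for keyword in level_indicators[level]):
--             return level
--
--     return 1  # Default to level 1 if no clear indicators
-- ===== SOURCE B (Python) =====
-- # One flat (keyword, level) table and a single running-max pass, instead of
-- # the descending level-by-level loop with early return.
-- _KEYWORD_LEVELS = [
--     ('autonomous', 5), ('ai-driven', 5), ('self-learning', 5), ('adaptive', 5),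
--     ('fully autonomous', 5), ('continuous learning', 5),
--     ('prescriptive', 4), ('recommend', 4), ('advanced analytics', 4),
--     ('automatically implement', 4), ('real-time optimization', 4),
--     ('predictive', 3), ('forecast', 3), ('system-generated alerts', 3),
--     ('proactive', 3), ('anticipate', 3),
--     ('dashboard', 2), ('diagnostic', 2), ('real-time data', 2),
--     ('analyze', 2), ('identify', 2), ('monitor', 2),
--     ('basic', 1), ('manual', 1), ('limited', 1), ('minimal', 1),
--     ('awareness', 1), ('historical', 1),
-- ]
--
--
-- def map_response_to_maturity(response_text: str) -> int:
--     """Map survey response text to maturity level 1-5"""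
--     if not response_text or response_text.strip() == '':
--         return 0
--     response_lower = response_text.lower()
--     best = 1
--     for keyword, level in _KEYWORD_LEVELS:
--         if keyword in response_lower:
--             best = max(best, level)
--     return best
-- ===== Notes on version B (the rewrite author's own statement) =====
-- stated objective: simpler
-- what changed: Replaces the descending level-by-level loop over a nested level->keywords dict (early return at the first level with a hit) by one running-max sweep over a single flat (keyword, level) table, keeping the 0-for-empty guard and 1 default.
import Mathlib
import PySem

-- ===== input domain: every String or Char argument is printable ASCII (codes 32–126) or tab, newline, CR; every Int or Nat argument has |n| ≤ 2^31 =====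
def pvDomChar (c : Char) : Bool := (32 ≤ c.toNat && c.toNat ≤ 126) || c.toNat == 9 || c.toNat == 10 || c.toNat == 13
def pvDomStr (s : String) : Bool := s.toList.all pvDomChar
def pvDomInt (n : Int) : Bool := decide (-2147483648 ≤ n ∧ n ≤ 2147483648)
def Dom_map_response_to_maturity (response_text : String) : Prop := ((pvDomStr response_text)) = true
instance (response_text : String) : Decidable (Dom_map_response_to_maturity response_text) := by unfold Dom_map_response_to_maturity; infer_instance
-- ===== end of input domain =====

-- B replaces A's descending early-exit loop over a level→keywords dict by one
-- running-max pass over a flat (keyword, level) table; objective: simpler.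

-- ===== PORT A =====
-- the level_indicators dict, as A builds it
def pvLevelIndicators : PySem.Dict Int (List String) :=
  PySem.Dict.ofList
    [(5, ["autonomous", "ai-driven", "self-learning", "adaptive", "fully autonomous", "continuous learning"]),
     (4, ["prescriptive", "recommend", "advanced analytics", "automatically implement", "real-time optimization"]),
     (3, ["predictive", "forecast", "system-generated alerts", "proactive", "anticipate"]),
     (2, ["dashboard", "diagnostic", "real-time data", "analyze", "identify", "monitor"]),
     (1, ["basic", "manual", "limited", "minimal", "awareness", "historical"])]

-- A's 'for level in range(5, 0, -1): … return level' loop (early return = stop at first hit)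
def pvALoop (resp : List Char) : List Int → Int
  | [] => 1
  | l :: rest =>
      if ((PySem.Dict.getD pvLevelIndicators l []).any fun kw => PySem.Chars.isIn kw.toList resp) then l
      else pvALoop resp rest

def map_response_to_maturity (response_text : String) : Int :=
  if response_text = "" || PySem.Str.strip response_text = "" then 0
  else
    let response_lower := PySem.Str.lower response_text
    pvALoop response_lower.toList (PySem.List.pyRange 5 0 (-1))

-- ===== PORT B =====
-- B's flat (keyword, level) table
def pvKeywordLevels : List (String × Int) :=
  [("autonomous", 5), ("ai-driven", 5), ("self-learning", 5), ("adaptive", 5),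
   ("fully autonomous", 5), ("continuous learning", 5),
   ("prescriptive", 4), ("recommend", 4), ("advanced analytics", 4),
   ("automatically implement", 4), ("real-time optimization", 4),
   ("predictive", 3), ("forecast", 3), ("system-generated alerts", 3),
   ("proactive", 3), ("anticipate", 3),
   ("dashboard", 2), ("diagnostic", 2), ("real-time data", 2),
   ("analyze", 2), ("identify", 2), ("monitor", 2),
   ("basic", 1), ("manual", 1), ("limited", 1), ("minimal", 1),
   ("awareness", 1), ("historical", 1)]

def map_response_to_maturity_alt (response_text : String) : Int :=
  if response_text = "" || PySem.Str.strip response_text = "" then 0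
  else
    let rl := (PySem.Str.lower response_text).toList
    pvKeywordLevels.foldl
      (fun best p => if PySem.Chars.isIn p.1.toList rl then max best p.2 else best) 1

-- ===== PRECONDITION & SPEC =====
def Spec_map_response_to_maturity (response_text : String) (out : Int) : Prop := out = map_response_to_maturity_alt response_text
instance (response_text : String) (out : Int) : Decidable (Spec_map_response_to_maturity response_text out) := by unfold Spec_map_response_to_maturity; infer_instance

-- ===== CLAIM (what is proved, stated in full; the proofs are below) =====
def Claim_equal_map_response_to_maturity : Prop := ∀ (response_text : String), Dom_map_response_to_maturity response_text → Spec_map_response_to_maturity response_text (map_response_to_maturity response_text)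

-- ===== LEMMAS AND PROOFS =====

-- one keyword group of level l, folded by B's step, is a single conditional max
theorem pv_group_fold (rl : List Char) (l : Int) (kws : List String) (b : Int) :
    (kws.map (fun k => (k, l))).foldl
      (fun best p => if PySem.Chars.isIn p.1.toList rl then max best p.2 else best) b
    = if kws.any (fun k => PySem.Chars.isIn k.toList rl) then max b l else b := by
  induction kws generalizing b with
  | nil => simp
  | cons k t ih =>
      simp only [List.map_cons, List.foldl_cons, List.any_cons]
      by_cases h : PySem.Chars.isIn k.toList rl = true
      · simp [h, ih]
      · simp [h, ih]

theorem pv_main (rl : List Char) :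
    pvALoop rl (PySem.List.pyRange 5 0 (-1))
    = pvKeywordLevels.foldl
        (fun best p => if PySem.Chars.isIn p.1.toList rl then max best p.2 else best) 1 := by
  have hr : PySem.List.pyRange 5 0 (-1) = [5, 4, 3, 2, 1] := by decide
  have hk : pvKeywordLevels =
      (["autonomous", "ai-driven", "self-learning", "adaptive", "fully autonomous", "continuous learning"].map (fun k => (k, (5 : Int)))) ++
      (["prescriptive", "recommend", "advanced analytics", "automatically implement", "real-time optimization"].map (fun k => (k, (4 : Int)))) ++
      (["predictive", "forecast", "system-generated alerts", "proactive", "anticipate"].map (fun k => (k, (3 : Int)))) ++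
      (["dashboard", "diagnostic", "real-time data", "analyze", "identify", "monitor"].map (fun k => (k, (2 : Int)))) ++
      (["basic", "manual", "limited", "minimal", "awareness", "historical"].map (fun k => (k, (1 : Int)))) := by rfl
  rw [hr, hk]
  simp only [List.foldl_append, pv_group_fold]
  by_cases h5 : (["autonomous", "ai-driven", "self-learning", "adaptive", "fully autonomous", "continuous learning"].any fun k => PySem.Chars.isIn k.toList rl) = true <;>
  by_cases h4 : (["prescriptive", "recommend", "advanced analytics", "automatically implement", "real-time optimization"].any fun k => PySem.Chars.isIn k.toList rl) = true <;>
  by_cases h3 : (["predictive", "forecast", "system-generated alerts", "proactive", "anticipate"].any fun k => PySem.Chars.isIn k.toList rl) = true <;>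
  by_cases h2 : (["dashboard", "diagnostic", "real-time data", "analyze", "identify", "monitor"].any fun k => PySem.Chars.isIn k.toList rl) = true <;>
  by_cases h1 : (["basic", "manual", "limited", "minimal", "awareness", "historical"].any fun k => PySem.Chars.isIn k.toList rl) = true <;>
  simp [pvALoop, show (PySem.Dict.getD pvLevelIndicators 5 []) = ["autonomous", "ai-driven", "self-learning", "adaptive", "fully autonomous", "continuous learning"] from rfl,
    show (PySem.Dict.getD pvLevelIndicators 4 []) = ["prescriptive", "recommend", "advanced analytics", "automatically implement", "real-time optimization"] from rfl,
    show (PySem.Dict.getD pvLevelIndicators 3 []) = ["predictive", "forecast", "system-generated alerts", "proactive", "anticipate"] from rfl,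
    show (PySem.Dict.getD pvLevelIndicators 2 []) = ["dashboard", "diagnostic", "real-time data", "analyze", "identify", "monitor"] from rfl,
    show (PySem.Dict.getD pvLevelIndicators 1 []) = ["basic", "manual", "limited", "minimal", "awareness", "historical"] from rfl,
    h5, h4, h3, h2, h1]

-- ===== VERDICT (by name: the statement is the Claim_ definition above) =====
theorem map_response_to_maturity_spec : Claim_equal_map_response_to_maturity := by
  intro s _
  unfold Spec_map_response_to_maturity map_response_to_maturity map_response_to_maturity_alt
  by_cases h : (s = "" || PySem.Str.strip s = "") = true
  · simp [h]
  · simp only [h, if_neg, Bool.not_eq_true] at *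
    simp [pv_main]
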